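-- pv_equiv track=rewrite | github.com/shishkabob27/cw-server | app.py | InvalidUsername
-- ===== SOURCE A (Python) =====
-- badcharaters = ['/', '\\', ':', '*', '?', '"', '<', '>', '|', ";", "%", "^", "&", "(", ")", "{", "}", "[", "]"]
--
-- def InvalidUsername(username):
-- 	username = username.lower()
-- 	for char in badcharaters:
-- 		if char in username:
-- 			return True
-- 	if username == 'ua' or username == 'guest':
-- 		return True
-- 	return False
-- ===== SOURCE B (Python) =====
-- BAD_SET = set('/\\:*?"<>|;%^&(){}[]')
--
-- def InvalidUsername(username):
--     u = username.lower()
--     if any(c in BAD_SET for c in u):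
--         return True
--     return u == 'ua' or u == 'guest'
-- ===== Notes on version B (the rewrite author's own statement) =====
-- stated objective: idiomatic
-- what changed: B traverses the username's characters once, testing each against a precomputed set of bad characters, instead of A's loop over the bad-character list with a substring search of the username per entry.
import Mathlib
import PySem

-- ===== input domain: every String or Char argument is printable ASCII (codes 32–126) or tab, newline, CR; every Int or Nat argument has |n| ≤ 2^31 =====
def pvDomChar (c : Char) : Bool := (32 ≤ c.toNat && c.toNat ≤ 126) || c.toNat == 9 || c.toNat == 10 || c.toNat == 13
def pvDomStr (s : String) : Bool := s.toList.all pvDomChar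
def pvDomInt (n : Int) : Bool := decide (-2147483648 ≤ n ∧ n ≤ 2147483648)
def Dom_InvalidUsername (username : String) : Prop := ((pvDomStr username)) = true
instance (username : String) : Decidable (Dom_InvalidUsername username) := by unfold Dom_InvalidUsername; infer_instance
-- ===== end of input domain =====

-- B scans the username's characters once against a precomputed set of bad characters,
-- instead of A's per-bad-character substring search of the username (idiomatic rewrite).

-- ===== PORT A =====
def badcharaters : List String :=
  ["/", "\\", ":", "*", "?", "\"", "<", ">", "|", ";", "%", "^", "&", "(", ")", "{", "}", "[", "]"]

-- 'for char in badcharaters: if char in username: return True' then the reserved-name check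
def InvalidUsernameLoop (u : String) : List String → Bool
  | [] => if u == "ua" || u == "guest" then true else false
  | c :: rest => if PySem.Str.isIn c u then true else InvalidUsernameLoop u rest

def InvalidUsername (username : String) : Bool :=
  InvalidUsernameLoop (PySem.Str.lower username) badcharaters

-- ===== PORT B =====
def badCharSet : PySem.Set Char := PySem.Set.ofList "/\\:*?\"<>|;%^&(){}[]".toList

def InvalidUsername_alt (username : String) : Bool :=
  let u := PySem.Str.lower username
  if u.toList.any (fun c => PySem.Set.contains badCharSet c) then true
  else u == "ua" || u == "guest"

-- ===== PRECONDITION & SPEC =====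
def Spec_InvalidUsername (username : String) (out : Bool) : Prop := out = InvalidUsername_alt username
instance (username : String) (out : Bool) : Decidable (Spec_InvalidUsername username out) := by unfold Spec_InvalidUsername; infer_instance

-- ===== CLAIM (what is proved, stated in full; the proofs are below) =====
def Claim_equal_InvalidUsername : Prop := ∀ (username : String), Dom_InvalidUsername username → Spec_InvalidUsername username (InvalidUsername username)

-- ===== LEMMAS AND PROOFS =====

-- single-character membership: 'c in s' as substring equals list membership
theorem isIn_singleton (c : Char) (s : List Char) :
    PySem.Chars.isIn [c] s = s.contains c := by
  by_cases h : c ∈ s <;>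
    simp [h, PySem.Chars.isIn_iff_infix, PySem.Chars.isIn_eq_false_iff, List.singleton_infix_iff]

-- A's loop is an 'any' over the bad-character list, then the reserved-name check
theorem loop_eq_any (u : String) (l : List String) :
    InvalidUsernameLoop u l
      = (l.any (fun c => PySem.Str.isIn c u) || (u == "ua" || u == "guest")) := by
  induction l with
  | nil => cases h : (u == "ua" || u == "guest") <;> simp [InvalidUsernameLoop, h]
  | cons c rest ih =>
      cases h : PySem.Str.isIn c u <;> simp [InvalidUsernameLoop, ih, Bool.or_assoc]

-- the two traversal orders agree: scanning l for members of m = scanning m for members of l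
theorem any_contains_comm (l m : List Char) :
    l.any (fun c => m.contains c) = m.any (fun c => l.contains c) := by
  rw [Bool.eq_iff_iff]
  simp only [List.any_eq_true, List.contains_eq_mem, decide_eq_true_eq]
  exact ⟨fun ⟨x, hl, hm⟩ => ⟨x, hm, hl⟩, fun ⟨x, hm, hl⟩ => ⟨x, hl, hm⟩⟩

theorem if_true_or (a b : Bool) : (if a then true else b) = (a || b) := by
  cases a <;> simp

-- the two scans agree: A's bad-character scan = B's character scan of the username
theorem scan_eq (u : String) :
    badcharaters.any (fun c => PySem.Str.isIn c u)
      = u.toList.any (fun c => PySem.Set.contains badCharSet c) := by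
  have hset : badCharSet = "/\\:*?\"<>|;%^&(){}[]".toList := by decide
  have hbad : badcharaters.map String.toList
      = [['/'], ['\\'], [':'], ['*'], ['?'], ['"'], ['<'], ['>'], ['|'], [';'],
         ['%'], ['^'], ['&'], ['('], [')'], ['{'], ['}'], ['['], [']']] := by decide
  calc badcharaters.any (fun c => PySem.Str.isIn c u)
      = (badcharaters.map String.toList).any (fun l => PySem.Chars.isIn l u.toList) := by
        rw [List.any_map]; rfl
    _ = u.toList.any (fun c => PySem.Set.contains badCharSet c) := by
        rw [hbad]
        simp only [hset, PySem.Set.contains_eq_listContains]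
        rw [any_contains_comm]
        simp [isIn_singleton, List.contains_eq_mem]

-- ===== VERDICT (by name: the statement is the Claim_ definition above) =====
theorem InvalidUsername_spec : Claim_equal_InvalidUsername := by
  intro username _
  unfold Spec_InvalidUsername InvalidUsername InvalidUsername_alt
  generalize PySem.Str.lower username = u
  rw [loop_eq_any, scan_eq, if_true_or]
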